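-- pv_equiv track=rewrite | github.com/vadlike/NanoKVM-Pro-DIY-APPS | apps/ap-WIFI/main.py | parse_multiline_blocks
-- ===== SOURCE A (Python) =====
-- def parse_multiline_blocks(text):
--     blocks = []
--     current = {}
--     for raw_line in text.splitlines():
--         line = raw_line.strip()
--         if not line:
--             if current:
--                 blocks.append(current)
--                 current = {}
--             continue
--         if ":" not in line:
--             continue
--         key, value = line.split(":", 1)
--         current[key.strip()] = value.strip()
--     if current:
--         blocks.append(current)
--     return blocks
-- ===== SOURCE B (Python) =====
-- def parse_multiline_blocks(text):
--     # Pass 1: group stripped lines into runs separated by blank (whitespace-only) lines.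
--     groups = []
--     run = []
--     for raw_line in text.splitlines():
--         line = raw_line.strip()
--         if line:
--             run.append(line)
--         else:
--             groups.append(run)
--             run = []
--     groups.append(run)
--     # Pass 2: parse each run into a dict; keep only the non-empty ones.
--     blocks = []
--     for g in groups:
--         d = {}
--         for line in g:
--             if ":" in line:
--                 key, value = line.split(":", 1)
--                 d[key.strip()] = value.strip()
--         if d:
--             blocks.append(d)
--     return blocks
-- ===== Notes on version B (the rewrite author's own statement) =====
-- stated objective: alternative
-- what changed: A's single loop that interleaves blank-line detection with dict building is replaced by two separate passes: first partition the stripped lines into blank-separated runs, then parse each run into a dict and keep the non-empty ones.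
import Mathlib
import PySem

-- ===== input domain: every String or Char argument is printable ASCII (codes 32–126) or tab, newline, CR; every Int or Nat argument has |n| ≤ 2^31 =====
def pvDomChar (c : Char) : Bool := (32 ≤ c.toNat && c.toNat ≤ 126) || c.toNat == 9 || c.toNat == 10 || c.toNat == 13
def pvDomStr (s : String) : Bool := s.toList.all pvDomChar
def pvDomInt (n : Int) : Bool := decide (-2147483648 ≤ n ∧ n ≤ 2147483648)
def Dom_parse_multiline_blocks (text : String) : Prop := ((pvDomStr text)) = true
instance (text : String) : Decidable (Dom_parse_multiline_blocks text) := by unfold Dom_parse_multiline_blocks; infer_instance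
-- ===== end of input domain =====

-- B replaces A's single interleaved loop by two passes (group lines into blank-separated runs, then parse each run); same results, no speed claim.


-- ===== PORT A =====
-- `key, value = line.split(":", 1)` — exact when ":" is in line (then the split has exactly two parts)
def pvSplitKV (line : String) : String × String :=
  match (PySem.Str.splitMax? line ":" 1).getD [line] with
  | k :: v :: _ => (k, v)
  | _ => (line, "")

-- one iteration of A's loop; state = (blocks so far, current dict)
def pvStepA (st : List (List (String × String)) × PySem.Dict String String) (raw_line : String) :
    List (List (String × String)) × PySem.Dict String String :=
  let line := PySem.Str.strip raw_line
  if line = "" then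
    if st.2.items.isEmpty then st else (st.1 ++ [st.2.items], PySem.Dict.empty)
  else if PySem.Str.isIn ":" line = false then st
  else
    let kv := pvSplitKV line
    (st.1, st.2.insert (PySem.Str.strip kv.1) (PySem.Str.strip kv.2))

def parse_multiline_blocks (text : String) : List (List (String × String)) :=
  let st := (PySem.Str.splitlines text).foldl pvStepA ([], PySem.Dict.empty)
  if st.2.items.isEmpty then st.1 else st.1 ++ [st.2.items]

-- ===== PORT B =====
-- pass 1 step: state = (finished runs, current run of stripped non-blank lines)
def pvGroupStep (st : List (List String) × List String) (raw_line : String) :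
    List (List String) × List String :=
  let line := PySem.Str.strip raw_line
  if line = "" then (st.1 ++ [st.2], []) else (st.1, st.2 ++ [line])

-- pass 2 inner loop: parse one run into a dict
def pvBlockOf (g : List String) : PySem.Dict String String :=
  g.foldl (fun d line =>
    if PySem.Str.isIn ":" line then
      let kv := pvSplitKV line
      d.insert (PySem.Str.strip kv.1) (PySem.Str.strip kv.2)
    else d) PySem.Dict.empty

-- pass 2 outer loop: keep only non-empty dicts
def pvEmit (bs : List (List (String × String))) (g : List String) : List (List (String × String)) :=
  let d := pvBlockOf g
  if d.items.isEmpty then bs else bs ++ [d.items]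

def parse_multiline_blocks_alt (text : String) : List (List (String × String)) :=
  let st := (PySem.Str.splitlines text).foldl pvGroupStep ([], [])
  let groups := st.1 ++ [st.2]
  groups.foldl pvEmit []

-- ===== PRECONDITION & SPEC =====
def Spec_parse_multiline_blocks (text : String) (out : List (List (String × String))) : Prop := out = parse_multiline_blocks_alt text
instance (text : String) (out : List (List (String × String))) : Decidable (Spec_parse_multiline_blocks text out) := by unfold Spec_parse_multiline_blocks; infer_instance

-- ===== CLAIM (what is proved, stated in full; the proofs are below) =====
def Claim_equal_parse_multiline_blocks : Prop := ∀ (text : String), Dom_parse_multiline_blocks text → Spec_parse_multiline_blocks text (parse_multiline_blocks text)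

-- ===== LEMMAS AND PROOFS =====

-- A's fold only appends to the blocks component
theorem pvFoldA_accum (ls : List String) (bs : List (List (String × String)))
    (cur : PySem.Dict String String) :
    ls.foldl pvStepA (bs, cur) =
      (bs ++ (ls.foldl pvStepA ([], cur)).1, (ls.foldl pvStepA ([], cur)).2) := by
  induction ls generalizing bs cur with
  | nil => simp
  | cons l ls ih =>
    simp only [List.foldl_cons, pvStepA]
    split_ifs with h1 h2
    · exact ih bs cur
    · rw [ih (bs ++ [cur.items]) PySem.Dict.empty, ih ([] ++ [cur.items]) PySem.Dict.empty]
      simp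
    · exact ih bs cur
    · exact ih bs _

-- B's grouping fold only appends to the finished-runs component
theorem pvFoldG_accum (ls : List String) (gs : List (List String)) (run : List String) :
    ls.foldl pvGroupStep (gs, run) =
      (gs ++ (ls.foldl pvGroupStep ([], run)).1, (ls.foldl pvGroupStep ([], run)).2) := by
  induction ls generalizing gs run with
  | nil => simp
  | cons l ls ih =>
    simp only [List.foldl_cons, pvGroupStep]
    split_ifs with h1
    · rw [ih (gs ++ [run]) [], ih ([] ++ [run]) []]
      simp
    · exact ih gs _

-- B's emitting fold only appends
theorem pvFoldE_accum (gs : List (List String)) (bs : List (List (String × String))) :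
    gs.foldl pvEmit bs = bs ++ gs.foldl pvEmit [] := by
  induction gs generalizing bs with
  | nil => simp
  | cons g gs ih =>
    simp only [List.foldl_cons, pvEmit]
    split_ifs with h
    · exact ih bs
    · rw [ih (bs ++ [(pvBlockOf g).items]), ih ([] ++ [(pvBlockOf g).items])]
      simp

-- an items-empty dict is the empty dict
theorem pvDict_eq_empty_of_items_isEmpty (d : PySem.Dict String String)
    (h : d.items.isEmpty = true) : d = PySem.Dict.empty := by
  cases d with
  | mk items => cases items with
    | nil => rfl
    | cons p ps => simp at h

-- the core invariant: A's loop started on the dict of `run` equals B's two passes started on `run`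
theorem pvMain (ls : List String) (run : List String) :
    (let st := ls.foldl pvStepA ([], pvBlockOf run)
     if st.2.items.isEmpty then st.1 else st.1 ++ [st.2.items]) =
    (let st := ls.foldl pvGroupStep ([], run)
     (st.1 ++ [st.2]).foldl pvEmit []) := by
  induction ls generalizing run with
  | nil => simp [pvEmit]
  | cons l ls ih =>
    simp only [List.foldl_cons, pvStepA, pvGroupStep]
    by_cases h1 : PySem.Str.strip l = ""
    · simp only [h1, if_true]
      have hempty : pvBlockOf ([] : List String) = PySem.Dict.empty := rfl
      by_cases h2 : (pvBlockOf run).items.isEmpty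
      · have hrun : pvBlockOf run = PySem.Dict.empty :=
          pvDict_eq_empty_of_items_isEmpty _ h2
        rw [if_pos h2]
        simp only [List.nil_append]
        rw [pvFoldG_accum ls [run] []]
        simp only [List.cons_append, List.foldl_cons]
        have he : pvEmit [] run = [] := by simp [pvEmit, h2]
        rw [he, hrun, ← hempty]
        simpa using ih []
      · rw [if_neg h2]
        simp only [List.nil_append]
        rw [pvFoldA_accum ls [(pvBlockOf run).items] PySem.Dict.empty]
        rw [pvFoldG_accum ls [run] []]
        simp only [List.cons_append, List.foldl_cons]
        have he : pvEmit [] run = [(pvBlockOf run).items] := by simp [pvEmit, h2]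
        rw [he, pvFoldE_accum]
        have := ih []
        rw [hempty] at this
        simp only [] at this ⊢
        split_ifs at this ⊢ <;> simp_all
    · simp only [h1, if_false]
      by_cases h3 : PySem.Str.isIn ":" (PySem.Str.strip l) = false
      · rw [if_pos h3]
        have hb : pvBlockOf (run ++ [PySem.Str.strip l]) = pvBlockOf run := by
          simp only [pvBlockOf, List.foldl_append, List.foldl_cons, List.foldl_nil]
          rw [if_neg (by simp only [h3]; exact Bool.false_ne_true)]
        simpa [hb] using ih (run ++ [PySem.Str.strip l])
      · rw [if_neg h3]
        have hb : pvBlockOf (run ++ [PySem.Str.strip l]) =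
            (pvBlockOf run).insert
              (PySem.Str.strip (pvSplitKV (PySem.Str.strip l)).1)
              (PySem.Str.strip (pvSplitKV (PySem.Str.strip l)).2) := by
          simp only [pvBlockOf, List.foldl_append, List.foldl_cons, List.foldl_nil]
          rw [if_pos (by revert h3; cases PySem.Str.isIn ":" (PySem.Str.strip l) <;> simp)]
        simpa [hb] using ih (run ++ [PySem.Str.strip l])

-- ===== VERDICT (by name: the statement is the Claim_ definition above) =====
theorem parse_multiline_blocks_spec : Claim_equal_parse_multiline_blocks := by
  intro text _
  unfold Spec_parse_multiline_blocks parse_multiline_blocks parse_multiline_blocks_alt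
  have := pvMain (PySem.Str.splitlines text) []
  simpa using this
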